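-- pv_equiv track=rewrite | github.com/summer-vacation/AlgoExec | python/find-the-longest-substring-containing-vowels-in-even-counts.py | findTheLongestSubstring2
-- ===== SOURCE A (Python) =====
-- def findTheLongestSubstring2(s: str) -> int:
--     mapper = {
--         "a": 1,
--         "e": 2,
--         "i": 4,
--         "o": 8,
--         "u": 16
--     }
--     seen = {0: -1}
--     res = cur = 0
--
--     for i, c in enumerate(s):
--         if c in mapper:
--             cur ^= mapper.get(c)
--             # 全部奇偶性都相同，相减一定都是偶数
--         if cur in seen:
--             # cur==0，res+1    元音偶数个，非元音
--             # cur!=0, max(之前最大，当前位置-上一次非偶数元音起点)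
--             res = max(res, i - seen.get(cur))
--         else:
--             seen[cur] = i
--     return res
-- ===== SOURCE B (Python) =====
-- def findTheLongestSubstring2(s: str) -> int:
--     # Brute force over all suffixes: for each start position, scan forward keeping
--     # a 5-bit vowel-parity mask and remember the longest prefix whose mask is 0.
--     bits = {"a": 1, "e": 2, "i": 4, "o": 8, "u": 16}
--
--     def longest_even_prefix(t):
--         cur = 0
--         best = 0
--         for k, c in enumerate(t, 1):
--             cur ^= bits.get(c, 0)
--             if cur == 0:
--                 best = k
--         return best
--
--     best = 0
--     while s:
--         best = max(best, longest_even_prefix(s))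
--         s = s[1:]
--     return best
-- ===== Notes on version B (the rewrite author's own statement) =====
-- stated objective: simpler
-- what changed: Replaced A's single-pass prefix-parity hashmap (dict of first-seen parity states) by a plain quadratic brute force: for every suffix start, rescan forward with a 5-bit vowel-parity mask and take the longest window whose mask is zero.
import Mathlib
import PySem

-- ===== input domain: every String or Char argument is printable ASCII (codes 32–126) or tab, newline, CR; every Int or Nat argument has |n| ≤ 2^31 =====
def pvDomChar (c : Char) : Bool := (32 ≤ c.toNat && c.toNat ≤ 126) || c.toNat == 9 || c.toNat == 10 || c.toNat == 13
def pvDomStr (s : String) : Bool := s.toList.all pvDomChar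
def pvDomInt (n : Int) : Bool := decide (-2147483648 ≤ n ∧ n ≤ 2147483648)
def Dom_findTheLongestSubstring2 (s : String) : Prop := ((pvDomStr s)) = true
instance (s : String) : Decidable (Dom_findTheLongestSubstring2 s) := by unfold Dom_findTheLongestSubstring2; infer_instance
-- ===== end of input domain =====

-- B replaces A's single-pass prefix-parity hashmap by a plain quadratic brute force over all
-- suffixes (objective: simpler — no dictionary bookkeeping; it is NOT faster than A).

-- ===== PORT A =====
-- helper: the literal vowel-bit dict of A
def pvMapperA : PySem.Dict Char Int :=
  PySem.Dict.ofList [('a', 1), ('e', 2), ('i', 4), ('o', 8), ('u', 16)]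

-- one iteration of A's for-loop (state: (seen, res, cur), item: (i, c))
def pvStepA (st : PySem.Dict Int Int × Int × Int) (ic : Int × Char) :
    PySem.Dict Int Int × Int × Int :=
  let seen := st.1
  let res := st.2.1
  let cur := st.2.2
  -- if c in mapper: cur ^= mapper.get(c)
  let cur := if pvMapperA.contains ic.2 then PySem.Int.bxor cur (pvMapperA.getD ic.2 0) else cur
  if seen.contains cur then
    -- res = max(res, i - seen.get(cur))   (guarded by 'cur in seen', so .get returns the stored value)
    (seen, max res (ic.1 - seen.getD cur 0), cur)
  else
    (seen.insert cur ic.1, res, cur)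

def findTheLongestSubstring2 (s : String) : Int :=
  ((PySem.List.enumerate s.toList 0).foldl pvStepA
    (PySem.Dict.ofList [((0 : Int), (-1 : Int))], 0, 0)).2.1

-- ===== PORT B =====
-- helper: the literal vowel-bit dict of B
def pvBitsB : PySem.Dict Char Int :=
  PySem.Dict.ofList [('a', 1), ('e', 2), ('i', 4), ('o', 8), ('u', 16)]

-- inner loop of B: longest prefix of t whose vowel-parity mask is 0 (state: (cur, best))
def longestEvenPrefix (t : List Char) : Int :=
  ((PySem.List.enumerate t 1).foldl
    (fun (st : Int × Int) kc =>
      let cur := PySem.Int.bxor st.1 (pvBitsB.getD kc.2 0)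
      (cur, if cur = 0 then kc.1 else st.2))
    (0, 0)).2

-- B's while-loop: peel one character per iteration (s = s[1:])
def pvGoB : List Char → Int → Int
  | [], best => best
  | c :: rest, best => pvGoB rest (max best (longestEvenPrefix (c :: rest)))

def findTheLongestSubstring2_alt (s : String) : Int := pvGoB s.toList 0

-- ===== PRECONDITION & SPEC =====
def Spec_findTheLongestSubstring2 (s : String) (out : Int) : Prop := out = findTheLongestSubstring2_alt s
instance (s : String) (out : Int) : Decidable (Spec_findTheLongestSubstring2 s out) := by unfold Spec_findTheLongestSubstring2; infer_instance

-- ===== CLAIM (what is proved, stated in full; the proofs are below) =====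
def Claim_equal_findTheLongestSubstring2 : Prop := ∀ (s : String), Dom_findTheLongestSubstring2 s → Spec_findTheLongestSubstring2 s (findTheLongestSubstring2 s)

-- ===== LEMMAS AND PROOFS =====

-- vowel bit of a character, as a Nat
def mmask (c : Char) : Nat :=
  if c = 'a' then 1 else if c = 'e' then 2 else if c = 'i' then 4
  else if c = 'o' then 8 else if c = 'u' then 16 else 0

-- parity mask of a character list
def NM (t : List Char) : Nat := t.foldl (fun a c => a ^^^ mmask c) 0

-- parity mask of the k-th prefix
def pfx (l : List Char) (k : Nat) : Nat := NM (l.take k)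

-- least index a with prefix mask m (Int-keyed, as in A's dict)
noncomputable def firstOf (l : List Char) (m : Int) : Nat := sInf {a | ((pfx l a : Int) = m)}

-- greatest b ≤ |l| with the same prefix mask as a
noncomputable def lastIdx (l : List Char) (a : Nat) : Nat :=
  Nat.findGreatest (fun b => pfx l b = pfx l a) l.length

noncomputable def AVal (l : List Char) : Nat :=
  (Finset.range (l.length + 1)).sup (fun b => b - firstOf l (pfx l b))

noncomputable def BVal (l : List Char) : Nat :=
  (Finset.range (l.length + 1)).sup (fun a => lastIdx l a - a)

-- the prefix masks of l, as Int (the key set of A's dict)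
def prefListI (l : List Char) : List Int := (List.range (l.length + 1)).map (fun k => (pfx l k : Int))

def runA (l : List Char) : PySem.Dict Int Int × Int × Int :=
  (PySem.List.enumerate l 0).foldl pvStepA (PySem.Dict.ofList [((0 : Int), (-1 : Int))], 0, 0)

theorem portA_eq_runA (s : String) : findTheLongestSubstring2 s = (runA s.toList).2.1 := rfl

-- ---- basic mask algebra (in Nat) ----

theorem foldl_xor_from (v : List Char) (x : Nat) :
    v.foldl (fun a c => a ^^^ mmask c) x = x ^^^ NM v := by
  induction v generalizing x with
  | nil => simp [NM]
  | cons c v ih =>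
    simp only [NM, List.foldl_cons] at *
    rw [ih (x ^^^ mmask c), ih (0 ^^^ mmask c)]
    simp [Nat.zero_xor, Nat.xor_assoc]

theorem NM_append (u v : List Char) : NM (u ++ v) = NM u ^^^ NM v := by
  simp only [NM, List.foldl_append]
  rw [foldl_xor_from]
  rfl

theorem NM_append_singleton (u : List Char) (c : Char) : NM (u ++ [c]) = NM u ^^^ mmask c := by
  rw [NM_append]
  simp [NM]

theorem pfx_append_le (l : List Char) (c : Char) {k : Nat} (hk : k ≤ l.length) :
    pfx (l ++ [c]) k = pfx l k := by
  simp [pfx, List.take_append_of_le_length hk]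

theorem pfx_append_last (l : List Char) (c : Char) :
    pfx (l ++ [c]) (l.length + 1) = pfx l l.length ^^^ mmask c := by
  have h1 : (l ++ [c]).take (l.length + 1) = l ++ [c] := by
    apply List.take_of_length_le; simp
  have h2 : l.take l.length = l := by simp
  simp [pfx, h1, h2, NM_append_singleton]

theorem pfx_of_ge (l : List Char) {k : Nat} (hk : l.length ≤ k) : pfx l k = NM l := by
  simp [pfx, List.take_of_length_le hk, NM]

theorem pfx_drop (l : List Char) (a k : Nat) :
    pfx l (a + k) = pfx l a ^^^ pfx (l.drop a) k := by
  simp only [pfx]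
  rw [List.take_add, NM_append]

-- A's cur-update is an unconditional xor with the vowel bit
theorem stepA_cur (cur : Int) (c : Char) :
    (if pvMapperA.contains c then PySem.Int.bxor cur (pvMapperA.getD c 0) else cur)
      = PySem.Int.bxor cur ((mmask c : Nat) : Int) := by
  have hmk : pvMapperA = PySem.Dict.mk [('a', 1), ('e', 2), ('i', 4), ('o', 8), ('u', 16)] := rfl
  by_cases h1 : c = 'a'
  · subst h1
    rw [show pvMapperA.contains 'a' = true from by decide, show pvMapperA.getD 'a' 0 = 1 from by decide]
    simp [mmask]
  by_cases h2 : c = 'e'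
  · subst h2
    rw [show pvMapperA.contains 'e' = true from by decide, show pvMapperA.getD 'e' 0 = 2 from by decide]
    simp [mmask, h1]
  by_cases h3 : c = 'i'
  · subst h3
    rw [show pvMapperA.contains 'i' = true from by decide, show pvMapperA.getD 'i' 0 = 4 from by decide]
    simp [mmask, h1, h2]
  by_cases h4 : c = 'o'
  · subst h4
    rw [show pvMapperA.contains 'o' = true from by decide, show pvMapperA.getD 'o' 0 = 8 from by decide]
    simp [mmask, h1, h2, h3]
  by_cases h5 : c = 'u'
  · subst h5
    rw [show pvMapperA.contains 'u' = true from by decide, show pvMapperA.getD 'u' 0 = 16 from by decide]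
    simp [mmask, h1, h2, h3, h4]
  have hc : pvMapperA.contains c = false := by
    rw [hmk, PySem.Dict.contains_eq_isSome_get?]
    simp [Ne.symm h1, Ne.symm h2, Ne.symm h3, Ne.symm h4, Ne.symm h5, PySem.Dict.get?]
  rw [hc]
  simp [mmask, h1, h2, h3, h4, h5]

theorem bitsB_getD (c : Char) : pvBitsB.getD c 0 = ((mmask c : Nat) : Int) := by
  have hmk : pvBitsB = PySem.Dict.mk [('a', 1), ('e', 2), ('i', 4), ('o', 8), ('u', 16)] := rfl
  by_cases h1 : c = 'a'
  · subst h1; rw [show pvBitsB.getD 'a' 0 = 1 from by decide]; simp [mmask]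
  by_cases h2 : c = 'e'
  · subst h2; rw [show pvBitsB.getD 'e' 0 = 2 from by decide]; simp [mmask, h1]
  by_cases h3 : c = 'i'
  · subst h3; rw [show pvBitsB.getD 'i' 0 = 4 from by decide]; simp [mmask, h1, h2]
  by_cases h4 : c = 'o'
  · subst h4; rw [show pvBitsB.getD 'o' 0 = 8 from by decide]; simp [mmask, h1, h2, h3]
  by_cases h5 : c = 'u'
  · subst h5; rw [show pvBitsB.getD 'u' 0 = 16 from by decide]; simp [mmask, h1, h2, h3, h4]
  rw [hmk, PySem.Dict.getD_eq_get?_getD]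
  simp [Ne.symm h1, Ne.symm h2, Ne.symm h3, Ne.symm h4, Ne.symm h5, mmask,
    h1, h2, h3, h4, h5, PySem.Dict.get?]

-- ---- firstOf / lastIdx facts ----

theorem firstOf_le {l : List Char} {m : Int} {b : Nat} (hb : (pfx l b : Int) = m) :
    firstOf l m ≤ b := by
  exact Nat.sInf_le hb

theorem firstOf_mem {l : List Char} {m : Int} (h : ∃ b, (pfx l b : Int) = m) :
    (pfx l (firstOf l m) : Int) = m := by
  exact Nat.sInf_mem h

theorem firstOf_congr {l l' : List Char} {m : Int} {n : Nat}
    (hagree : ∀ a ≤ n, pfx l a = pfx l' a)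
    (hex : ∃ a ≤ n, (pfx l a : Int) = m) :
    firstOf l m = firstOf l' m := by
  obtain ⟨a0, ha0n, ha0⟩ := hex
  have hex1 : ∃ b, (pfx l b : Int) = m := ⟨a0, ha0⟩
  have hex2 : ∃ b, (pfx l' b : Int) = m := ⟨a0, by rw [← hagree a0 ha0n]; exact ha0⟩
  have h1 : firstOf l m ≤ a0 := firstOf_le ha0
  have h2 : firstOf l' m ≤ a0 := firstOf_le (by rw [← hagree a0 ha0n]; exact ha0)
  apply le_antisymm
  · apply firstOf_le
    rw [hagree _ (le_trans h2 ha0n)]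
    exact firstOf_mem hex2
  · apply firstOf_le
    rw [← hagree _ (le_trans h1 ha0n)]
    exact firstOf_mem hex1

theorem findGreatest_congr {P Q : Nat → Prop} [DecidablePred P] [DecidablePred Q] (n : Nat)
    (h : ∀ k ≤ n, (P k ↔ Q k)) : Nat.findGreatest P n = Nat.findGreatest Q n := by
  induction n with
  | zero => simp [Nat.findGreatest_zero]
  | succ n ih =>
    rw [Nat.findGreatest_succ, Nat.findGreatest_succ]
    by_cases hp : P (n + 1)
    · simp [hp, (h (n + 1) le_rfl).mp hp]
    · have hq : ¬Q (n + 1) := fun hq => hp ((h (n + 1) le_rfl).mpr hq)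
      simp [hp, hq]
      exact ih (fun k hk => h k (le_trans hk (Nat.le_succ n)))

theorem findGreatest_shift (P : Nat → Prop) [DecidablePred P] (a n : Nat)
    (ha : a ≤ n) (hPa : P a) :
    Nat.findGreatest P n = a + Nat.findGreatest (fun k => P (a + k)) (n - a) := by
  have hQ0 : (fun k => P (a + k)) 0 := by simpa using hPa
  have hg_le : Nat.findGreatest P n ≤ n := Nat.findGreatest_le n
  have hk_le : Nat.findGreatest (fun k => P (a + k)) (n - a) ≤ n - a := Nat.findGreatest_le _
  have hPg : P (Nat.findGreatest P n) := Nat.findGreatest_spec ha hPa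
  have hQg : P (a + Nat.findGreatest (fun k => P (a + k)) (n - a)) :=
    Nat.findGreatest_spec (P := fun k => P (a + k)) (Nat.zero_le _) hQ0
  have hag : a ≤ Nat.findGreatest P n := Nat.le_findGreatest ha hPa
  apply le_antisymm
  · have hle : Nat.findGreatest P n - a ≤ Nat.findGreatest (fun k => P (a + k)) (n - a) := by
      apply Nat.le_findGreatest (by omega)
      have he : a + (Nat.findGreatest P n - a) = Nat.findGreatest P n := by omega
      rw [he]; exact hPg
    omega
  · have hle : a + Nat.findGreatest (fun k => P (a + k)) (n - a) ≤ Nat.findGreatest P n :=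
      Nat.le_findGreatest (by omega) hQg
    omega

-- ---- the combinatorial heart: first-occurrence view = last-occurrence view ----

theorem AVal_eq_BVal (l : List Char) : AVal l = BVal l := by
  apply le_antisymm
  · apply Finset.sup_le
    intro b hb
    rw [Finset.mem_range] at hb
    have hb' : b ≤ l.length := by omega
    have hfm : (pfx l (firstOf l (pfx l b)) : Int) = (pfx l b : Int) := firstOf_mem ⟨b, rfl⟩
    have hf_le : firstOf l (pfx l b) ≤ b := firstOf_le rfl
    have hlast : b ≤ lastIdx l (firstOf l (pfx l b)) := by
      unfold lastIdx
      apply Nat.le_findGreatest hb'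
      exact_mod_cast hfm.symm
    have hmem : firstOf l (pfx l b) ∈ Finset.range (l.length + 1) := by
      rw [Finset.mem_range]; omega
    calc b - firstOf l (pfx l b)
        ≤ lastIdx l (firstOf l (pfx l b)) - firstOf l (pfx l b) := by omega
      _ ≤ BVal l := by
          unfold BVal
          exact Finset.le_sup (f := fun a => lastIdx l a - a) hmem
  · apply Finset.sup_le
    intro a hamem
    rw [Finset.mem_range] at hamem
    have ha : a ≤ l.length := by omega
    have hlast_le : lastIdx l a ≤ l.length := Nat.findGreatest_le _
    have hPl : pfx l (lastIdx l a) = pfx l a := by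
      unfold lastIdx
      exact Nat.findGreatest_spec (P := fun b => pfx l b = pfx l a) ha rfl
    have hfa : firstOf l (pfx l (lastIdx l a)) ≤ a := by
      apply firstOf_le
      exact congrArg (Nat.cast : Nat → Int) hPl.symm
    have hmem : lastIdx l a ∈ Finset.range (l.length + 1) := by
      rw [Finset.mem_range]; omega
    calc lastIdx l a - a
        ≤ lastIdx l a - firstOf l (pfx l (lastIdx l a)) := by omega
      _ ≤ AVal l := by
          unfold AVal
          exact Finset.le_sup (f := fun b => b - firstOf l (pfx l b)) hmem

theorem pvXorCancel {x d : Nat} (h : x ^^^ d = x) : d = 0 := by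
  have h2 : x ^^^ (x ^^^ d) = x ^^^ x := by rw [h]
  rwa [← Nat.xor_assoc, Nat.xor_self, Nat.zero_xor] at h2

theorem mem_prefListI {l : List Char} {m : Int} :
    m ∈ prefListI l ↔ ∃ k, k ≤ l.length ∧ (pfx l k : Int) = m := by
  unfold prefListI
  simp only [List.mem_map, List.mem_range]
  constructor
  · rintro ⟨k, hk, rfl⟩; exact ⟨k, by omega, rfl⟩
  · rintro ⟨k, hk, rfl⟩; exact ⟨k, by omega, rfl⟩

theorem runA_append (l : List Char) (c : Char) :
    runA (l ++ [c]) = pvStepA (runA l) ((l.length : Int), c) := by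
  unfold runA
  rw [PySem.List.enumerate_append, List.foldl_append]
  simp [PySem.List.enumerate_cons, PySem.List.enumerate_nil]

-- ---- A's loop invariant ----

theorem runA_inv (l : List Char) :
    (runA l).2.2 = ((pfx l l.length : Nat) : Int) ∧
    (runA l).2.1 = (AVal l : Int) ∧
    ∀ m : Int, (runA l).1.get? m =
      (if m ∈ prefListI l then some ((firstOf l m : Int) - 1) else none) := by
  induction l using List.reverseRecOn with
  | nil =>
    have hA : AVal [] = 0 := by simp [AVal]
    refine ⟨rfl, by simp [runA, PySem.List.enumerate_nil, hA], ?_⟩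
    intro m
    have hpl : prefListI [] = [(0 : Int)] := rfl
    by_cases hm : m = 0
    · subst hm
      have hf : firstOf [] 0 = 0 := Nat.le_zero.mp (firstOf_le (b := 0) rfl)
      simp [runA, PySem.List.enumerate_nil, hpl, hf]
      decide
    · have hg : (PySem.Dict.ofList [((0 : Int), (-1 : Int))]).get? m = none := by
        rw [show (PySem.Dict.ofList [((0 : Int), (-1 : Int))])
              = PySem.Dict.mk [((0 : Int), (-1 : Int))] from rfl]
        simp [PySem.Dict.get?, Ne.symm hm]
      simp [runA, PySem.List.enumerate_nil, hpl, hm, hg]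
  | append_singleton l c ih =>
    obtain ⟨hcur, hres, hseen⟩ := ih
    rw [runA_append]
    simp only [pvStepA]
    rw [hcur, hres, stepA_cur, PySem.Int.bxor_natCast, ← pfx_append_last l c]
    have hagree : ∀ a ≤ l.length, pfx l a = pfx (l ++ [c]) a :=
      fun a ha => (pfx_append_le l c ha).symm
    have hlen : (l ++ [c]).length = l.length + 1 := by simp
    have hmemIff : ∀ m : Int, m ∈ prefListI (l ++ [c]) ↔
        (m ∈ prefListI l ∨ m = ((pfx (l ++ [c]) (l.length + 1) : Nat) : Int)) := by
      intro m
      rw [mem_prefListI, mem_prefListI, hlen]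
      constructor
      · rintro ⟨k, hk, hkeq⟩
        by_cases hkn : k ≤ l.length
        · exact Or.inl ⟨k, hkn, by rw [hagree k hkn]; exact hkeq⟩
        · have hke : k = l.length + 1 := by omega
          subst hke
          exact Or.inr hkeq.symm
      · rintro (⟨k, hk, hkeq⟩ | rfl)
        · exact ⟨k, by omega, by rw [← hagree k hk]; exact hkeq⟩
        · exact ⟨l.length + 1, le_rfl, rfl⟩
    have hAVal : AVal (l ++ [c])
        = max (AVal l) ((l.length + 1) - firstOf (l ++ [c]) (pfx (l ++ [c]) (l.length + 1))) := by
      unfold AVal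
      rw [hlen, Finset.range_add_one, Finset.sup_insert]
      have hcongr : ∀ b ∈ Finset.range (l.length + 1),
          b - firstOf (l ++ [c]) (pfx (l ++ [c]) b) = b - firstOf l (pfx l b) := by
        intro b hbm
        rw [Finset.mem_range] at hbm
        have hb : b ≤ l.length := by omega
        rw [← hagree b hb, firstOf_congr hagree ⟨b, hb, rfl⟩]
      rw [Finset.sup_congr rfl hcongr]
      rw [sup_comm]
    by_cases hin : ((pfx (l ++ [c]) (l.length + 1) : Nat) : Int) ∈ prefListI l
    · have hcontT : (runA l).1.contains ((pfx (l ++ [c]) (l.length + 1) : Nat) : Int) = true := by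
        rw [PySem.Dict.contains_eq_isSome_get?, hseen, if_pos hin]; rfl
      rw [hcontT]
      simp only [if_true]
      obtain ⟨a0, ha0n, ha0⟩ := mem_prefListI.mp hin
      have hfcongr : firstOf (l ++ [c]) ((pfx (l ++ [c]) (l.length + 1) : Nat) : Int)
          = firstOf l ((pfx (l ++ [c]) (l.length + 1) : Nat) : Int) :=
        (firstOf_congr hagree ⟨a0, ha0n, ha0⟩).symm
      have hf_le : firstOf l ((pfx (l ++ [c]) (l.length + 1) : Nat) : Int) ≤ l.length :=
        le_trans (firstOf_le ha0) ha0n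
      refine ⟨by rw [hlen], ?_, ?_⟩
      · rw [PySem.Dict.getD_eq_get?_getD, hseen, if_pos hin, Option.getD_some, hAVal, hfcongr]
        rw [Nat.cast_max, Nat.cast_sub (by omega)]
        congr 1
        push_cast
        ring
      · intro m
        rw [hseen m]
        by_cases hm : m ∈ prefListI l
        · have hmnew : m ∈ prefListI (l ++ [c]) := (hmemIff m).mpr (Or.inl hm)
          rw [if_pos hm, if_pos hmnew]
          obtain ⟨b0, hb0n, hb0⟩ := mem_prefListI.mp hm
          rw [firstOf_congr hagree ⟨b0, hb0n, hb0⟩]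
        · have hmm : m ≠ ((pfx (l ++ [c]) (l.length + 1) : Nat) : Int) := by
            intro h; exact hm (h ▸ hin)
          have hmnew : ¬ m ∈ prefListI (l ++ [c]) := by
            rw [hmemIff m]; tauto
          rw [if_neg hm, if_neg hmnew]
    · have hcontF : (runA l).1.contains ((pfx (l ++ [c]) (l.length + 1) : Nat) : Int) = false := by
        rw [PySem.Dict.contains_eq_isSome_get?, hseen, if_neg hin]; rfl
      rw [hcontF]
      simp only [Bool.false_eq_true, if_false]
      have hfm' : firstOf (l ++ [c]) ((pfx (l ++ [c]) (l.length + 1) : Nat) : Int) = l.length + 1 := by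
        apply le_antisymm
        · exact firstOf_le rfl
        · by_contra hlt
          push Not at hlt
          have hfo_le : firstOf (l ++ [c]) ((pfx (l ++ [c]) (l.length + 1) : Nat) : Int) ≤ l.length := by
            omega
          have hmem := firstOf_mem (l := l ++ [c])
            (m := ((pfx (l ++ [c]) (l.length + 1) : Nat) : Int)) ⟨l.length + 1, rfl⟩
          exact hin (mem_prefListI.mpr
            ⟨_, hfo_le, by rw [hagree _ hfo_le]; exact hmem⟩)
      refine ⟨by rw [hlen], ?_, ?_⟩
      · rw [hAVal, hfm']
        simp
      · intro m
        rw [PySem.Dict.get?_insert]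
        by_cases hmm : m = ((pfx (l ++ [c]) (l.length + 1) : Nat) : Int)
        · subst hmm
          rw [if_pos rfl, if_pos ((hmemIff _).mpr (Or.inr rfl)), hfm']
          push_cast
          congr 1
          ring
        · rw [if_neg hmm, hseen m]
          by_cases hm : m ∈ prefListI l
          · have hmnew : m ∈ prefListI (l ++ [c]) := (hmemIff m).mpr (Or.inl hm)
            rw [if_pos hm, if_pos hmnew]
            obtain ⟨b0, hb0n, hb0⟩ := mem_prefListI.mp hm
            rw [firstOf_congr hagree ⟨b0, hb0n, hb0⟩]
          · have hmnew : ¬ m ∈ prefListI (l ++ [c]) := by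
              rw [hmemIff m]; tauto
            rw [if_neg hm, if_neg hmnew]

-- ---- B's loops ----

theorem lep_fold (t : List Char) :
    (PySem.List.enumerate t 1).foldl
      (fun (st : Int × Int) kc =>
        let cur := PySem.Int.bxor st.1 (pvBitsB.getD kc.2 0)
        (cur, if cur = 0 then kc.1 else st.2))
      (0, 0)
    = (((NM t : Nat) : Int), ((Nat.findGreatest (fun k => pfx t k = 0) t.length : Nat) : Int)) := by
  induction t using List.reverseRecOn with
  | nil =>
    simp [PySem.List.enumerate_nil, NM]
  | append_singleton t c ih =>
    rw [PySem.List.enumerate_append, List.foldl_append, ih]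
    simp only [PySem.List.enumerate_cons, PySem.List.enumerate_nil, List.foldl_cons, List.foldl_nil]
    rw [bitsB_getD c, PySem.Int.bxor_natCast, ← NM_append_singleton]
    have hlen : (t ++ [c]).length = t.length + 1 := by simp
    have hlast : pfx (t ++ [c]) (t.length + 1) = NM (t ++ [c]) := pfx_of_ge _ (by simp)
    have hcongr : Nat.findGreatest (fun k => pfx (t ++ [c]) k = 0) t.length
        = Nat.findGreatest (fun k => pfx t k = 0) t.length :=
      findGreatest_congr _ (fun k hk => by rw [pfx_append_le t c hk])
    rw [hlen, Nat.findGreatest_succ, hlast, hcongr]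
    by_cases h0 : NM (t ++ [c]) = 0
    · simp only [h0, Nat.cast_zero, if_true]
      refine Prod.ext rfl ?_
      push_cast
      ring
    · have hcast : ¬ ((NM (t ++ [c]) : Int) = 0) := by exact_mod_cast h0
      simp [h0]

theorem lep_drop (l : List Char) {a : Nat} (ha : a ≤ l.length) :
    longestEvenPrefix (l.drop a) = ((lastIdx l a - a : Nat) : Int) := by
  unfold longestEvenPrefix
  rw [lep_fold]
  simp only [List.length_drop]
  have hiff : ∀ k ≤ l.length - a, (pfx (l.drop a) k = 0 ↔ pfx l (a + k) = pfx l a) := by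
    intro k hk
    have hd := pfx_drop l a k
    constructor
    · intro h; rw [hd, h, Nat.xor_zero]
    · intro h
      rw [hd] at h
      exact pvXorCancel h
  rw [findGreatest_congr _ hiff]
  have hshift := findGreatest_shift (fun b => pfx l b = pfx l a) a l.length ha rfl
  unfold lastIdx
  rw [hshift, Nat.add_sub_cancel_left]

theorem goB_spec (l : List Char) (i : Nat) (hi : i ≤ l.length) (best : Int) (hb : 0 ≤ best) :
    pvGoB (l.drop i) best
      = max best (((Finset.Icc i l.length).sup (fun a => lastIdx l a - a) : Nat) : Int) := by
  obtain ⟨k, hk⟩ : ∃ k, l.length - i = k := ⟨_, rfl⟩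
  induction k generalizing i best with
  | zero =>
    have hieq : i = l.length := by omega
    subst hieq
    have hlast : lastIdx l l.length = l.length := by
      unfold lastIdx
      exact le_antisymm (Nat.findGreatest_le _) (Nat.le_findGreatest le_rfl rfl)
    rw [show l.drop l.length = [] by simp, Finset.Icc_self]
    simp [pvGoB, hlast, max_eq_left hb]
  | succ k ih =>
    have hlt : i < l.length := by omega
    have hdrop : l.drop i = l[i] :: l.drop (i + 1) := List.drop_eq_getElem_cons hlt
    rw [hdrop,
      show pvGoB (l[i] :: l.drop (i + 1)) best
        = pvGoB (l.drop (i + 1)) (max best (longestEvenPrefix (l[i] :: l.drop (i + 1)))) from rfl,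
      ← hdrop, lep_drop l (le_of_lt hlt)]
    rw [ih (i + 1) (by omega) _ (le_trans hb (le_max_left _ _)) (by omega)]
    have hIcc : Finset.Icc i l.length = insert i (Finset.Icc (i + 1) l.length) := by
      ext x
      simp only [Finset.mem_Icc, Finset.mem_insert]
      omega
    rw [hIcc, Finset.sup_insert, Nat.cast_max, max_assoc]

theorem portB_eq (s : String) : findTheLongestSubstring2_alt s = (BVal s.toList : Int) := by
  have h := goB_spec s.toList 0 (Nat.zero_le _) 0 le_rfl
  rw [List.drop_zero] at h
  unfold findTheLongestSubstring2_alt BVal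
  rw [h]
  have hIcc : Finset.Icc 0 s.toList.length = Finset.range (s.toList.length + 1) := by
    ext x
    simp only [Finset.mem_Icc, Finset.mem_range]
    omega
  rw [hIcc]
  exact max_eq_right (Int.natCast_nonneg _)

-- ===== VERDICT (by name: the statement is the Claim_ definition above) =====
theorem findTheLongestSubstring2_spec : Claim_equal_findTheLongestSubstring2 := by
  intro s _
  unfold Spec_findTheLongestSubstring2
  rw [portA_eq_runA, (runA_inv s.toList).2.1, portB_eq, AVal_eq_BVal]
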